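-- pv_equiv track=rewrite | github.com/yofn/pyacm | bnu/team_201005/c.py | f
-- ===== SOURCE A (Python) =====
-- def f(r,s,p,ll):
--     fd = lambda p: p[0]+(p[1] if p[1]>0 else -p[1])
--     fj = lambda j: s-(j-1) if j<=s else j-s
--     ll = [[r-pp[0],fj(pp[1])] for pp in ll]
--     dl = list(map(fd,ll))
--     dl.sort()
--     for i in range(1,len(dl)):
--         dl[i] = max(dl[i-1]+1,dl[i])
--     return dl[-1]+1
-- ===== SOURCE B (Python) =====
-- def f(r, s, p, ll):
--     fj = lambda j: s - (j - 1) if j <= s else j - s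
--     dl = sorted(r - x + abs(fj(y)) for x, y in ll)
--     n = len(dl)
--     return max(d + (n - 1 - i) for i, d in enumerate(dl)) + 1
-- ===== Notes on version B (the rewrite author's own statement) =====
-- stated objective: alternative
-- what changed: The in-place greedy propagation loop (dl[i] = max(dl[i-1]+1, dl[i]) threaded left to right, then dl[-1]+1) is replaced by a closed-form reduction: the answer is max_i(dl[i] + (n-1-i)) + 1 over the sorted transformed distances, with no mutation and no threaded state.
import Mathlib
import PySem

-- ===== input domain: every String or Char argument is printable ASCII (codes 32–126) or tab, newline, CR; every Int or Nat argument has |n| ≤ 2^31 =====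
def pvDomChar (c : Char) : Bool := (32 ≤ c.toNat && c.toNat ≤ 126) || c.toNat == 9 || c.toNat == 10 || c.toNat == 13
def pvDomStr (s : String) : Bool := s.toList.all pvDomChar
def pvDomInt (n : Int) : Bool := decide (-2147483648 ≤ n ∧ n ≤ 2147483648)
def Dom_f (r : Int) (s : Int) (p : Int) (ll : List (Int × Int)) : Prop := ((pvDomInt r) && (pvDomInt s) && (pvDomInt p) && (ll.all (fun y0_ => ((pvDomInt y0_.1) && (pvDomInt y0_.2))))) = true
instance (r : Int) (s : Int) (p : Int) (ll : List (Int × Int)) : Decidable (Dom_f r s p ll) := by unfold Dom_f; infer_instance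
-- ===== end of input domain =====

-- B replaces A's in-place greedy propagation loop by the closed form max_i(dl[i] + (n-1-i)) + 1
-- over the same sorted transformed list (objective: alternative; same cost).

-- ===== PORT A =====
-- the loop body 'dl[i] = max(dl[i-1]+1, dl[i])': indices 1 ≤ i < len(dl) are always in range,
-- so pyGetD with default 0 is exact there
def fStepA (acc : List Int) (i : Int) : List Int :=
  acc.set i.toNat (max (PySem.List.pyGetD acc (i - 1) 0 + 1) (PySem.List.pyGetD acc i 0))

def f (r : Int) (s : Int) (p : Int) (ll : List (Int × Int)) : Int :=
  let fd : Int × Int → Int := fun q => q.1 + (if q.2 > 0 then q.2 else -q.2)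
  let fj : Int → Int := fun j => if j ≤ s then s - (j - 1) else j - s
  let ll2 : List (Int × Int) := ll.map (fun pp => (r - pp.1, fj pp.2))
  let dl : List Int := PySem.List.sorted (ll2.map fd) (fun x => x) false
  let dl2 : List Int := (PySem.List.pyRange 1 (dl.length : Int) 1).foldl fStepA dl
  -- dl[-1] raises IndexError on empty dl (excluded by Pre_f); getD 0 is never taken inside Pre_f
  (PySem.List.pyGet? dl2 (-1)).getD 0 + 1

-- ===== PORT B =====
def f_alt (r : Int) (s : Int) (p : Int) (ll : List (Int × Int)) : Int :=
  let fj : Int → Int := fun j => if j ≤ s then s - (j - 1) else j - s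
  let dl : List Int := PySem.List.sorted (ll.map (fun q => r - q.1 + |fj q.2|)) (fun x => x) false
  let n : Int := dl.length
  -- max() raises ValueError on empty dl (excluded by Pre_f); getD 0 is never taken inside Pre_f
  (PySem.List.max? ((PySem.List.enumerate dl).map (fun q => q.2 + (n - 1 - q.1))) (fun x => x)).getD 0 + 1

-- ===== PRECONDITION & SPEC =====
-- Pre_f excludes exactly the empty list, on which A raises IndexError (dl[-1]); B raises ValueError there (empty max()).
def Pre_f (r : Int) (s : Int) (p : Int) (ll : List (Int × Int)) : Prop := ll ≠ []
instance (r : Int) (s : Int) (p : Int) (ll : List (Int × Int)) : Decidable (Pre_f r s p ll) := by unfold Pre_f; infer_instance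
def pvWitness_f : Int × Int × Int × (List (Int × Int)) := (10, 3, 2, [(1, 2), (4, -1)])

def Spec_f (r : Int) (s : Int) (p : Int) (ll : List (Int × Int)) (out : Int) : Prop := out = f_alt r s p ll
instance (r : Int) (s : Int) (p : Int) (ll : List (Int × Int)) (out : Int) : Decidable (Spec_f r s p ll out) := by unfold Spec_f; infer_instance

-- ===== CLAIM (what is proved, stated in full; the proofs are below) =====
def Claim_equal_f : Prop := ∀ (r : Int) (s : Int) (p : Int) (ll : List (Int × Int)), Dom_f r s p ll → Pre_f r s p ll → Spec_f r s p ll (f r s p ll)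

-- ===== LEMMAS AND PROOFS =====

-- A's threaded greedy value: prev = dl[0]; for d in dl[1:]: prev = max(prev+1, d)
def fThread (d0 : Int) (rest : List Int) : Int :=
  rest.foldl (fun prev d => max (prev + 1) d) d0

theorem fThread_append (d0 : Int) (rest : List Int) (x : Int) :
    fThread d0 (rest ++ [x]) = max (fThread d0 rest + 1) x := by
  simp [fThread, List.foldl_append]

theorem fStepA_length (acc : List Int) (i : Int) : (fStepA acc i).length = acc.length := by
  simp [fStepA]

theorem foldl_fStepA_length (idxs : List Int) (acc : List Int) :
    (idxs.foldl fStepA acc).length = acc.length := by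
  induction idxs generalizing acc with
  | nil => rfl
  | cons i t ih => simp [List.foldl_cons, ih, fStepA_length]

-- indices 1 ≤ i < b ≤ |acc| never touch the appended last cell
theorem foldl_fStepA_append (a b : Int) (acc : List Int) (x : Int)
    (ha : 1 ≤ a) (hb : b ≤ (acc.length : Int)) :
    (PySem.List.pyRange a b 1).foldl fStepA (acc ++ [x]) =
      ((PySem.List.pyRange a b 1).foldl fStepA acc) ++ [x] := by
  by_cases hab : b ≤ a
  · rw [PySem.List.pyRange_one_eq_nil hab]; rfl
  · rw [not_le] at hab
    have hk : ((b - (a + 1)).toNat) < ((b - a).toNat) := by omega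
    rw [PySem.List.pyRange_one_cons hab, List.foldl_cons, List.foldl_cons]
    have hstep : fStepA (acc ++ [x]) a = (fStepA acc a) ++ [x] := by
      have h1 : PySem.List.pyGetD (acc ++ [x]) (a - 1) 0 = PySem.List.pyGetD acc (a - 1) 0 := by
        rw [PySem.List.pyGetD_of_nonneg _ _ (by omega),
            PySem.List.pyGetD_of_nonneg _ _ (by omega)]
        rw [List.getD_eq_getElem?_getD, List.getD_eq_getElem?_getD,
            List.getElem?_append_left (by omega)]
      have h2 : PySem.List.pyGetD (acc ++ [x]) a 0 = PySem.List.pyGetD acc a 0 := by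
        rw [PySem.List.pyGetD_of_nonneg _ _ (by omega),
            PySem.List.pyGetD_of_nonneg _ _ (by omega)]
        rw [List.getD_eq_getElem?_getD, List.getD_eq_getElem?_getD,
            List.getElem?_append_left (by omega)]
      have h3 : (acc ++ [x]).set a.toNat (max (PySem.List.pyGetD acc (a - 1) 0 + 1) (PySem.List.pyGetD acc a 0)) =
          (acc.set a.toNat (max (PySem.List.pyGetD acc (a - 1) 0 + 1) (PySem.List.pyGetD acc a 0))) ++ [x] :=
        List.set_append_left _ _ (by omega)
      simp [fStepA, h1, h2, h3]
    rw [hstep]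
    exact foldl_fStepA_append (a + 1) b (fStepA acc a) x (by omega)
      (by rw [fStepA_length]; exact hb)
termination_by (b - a).toNat
decreasing_by omega

-- after A's loop, the last cell holds the threaded greedy value
theorem fLoop_getLast (d0 : Int) (rest : List Int) :
    ((PySem.List.pyRange 1 (((d0 :: rest).length : Int)) 1).foldl fStepA (d0 :: rest)).getLast? =
      some (fThread d0 rest) := by
  induction rest using List.reverseRecOn with
  | nil => simp [PySem.List.pyRange_one_eq_nil (le_refl (1:Int)), fThread]
  | append_singleton t x ih =>
    rw [show d0 :: (t ++ [x]) = (d0 :: t) ++ [x] from rfl]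
    set L : List Int := d0 :: t with hL
    have hlen : (((L ++ [x]).length : Int)) = (L.length : Int) + 1 := by simp
    have hm : 1 ≤ (L.length : Int) := by simp [hL]
    rw [hlen, PySem.List.pyRange_one_succ_right (by omega), List.foldl_append,
        List.foldl_cons, List.foldl_nil,
        foldl_fStepA_append 1 (L.length : Int) L x le_rfl le_rfl]
    set M := (PySem.List.pyRange 1 (L.length : Int) 1).foldl fStepA L with hM
    have hMlen : M.length = L.length := foldl_fStepA_length _ _
    have hlast : M.getLast? = some (fThread d0 t) := ih
    have hMpos : 0 < M.length := by simp [hMlen, hL]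
    have hg1 : PySem.List.pyGetD (M ++ [x]) ((L.length : Int) - 1) 0 = fThread d0 t := by
      rw [PySem.List.pyGetD_of_nonneg _ _ (by omega), List.getD_eq_getElem?_getD,
          List.getElem?_append_left (by omega)]
      have h1 : ((L.length : Int) - 1).toNat = M.length - 1 := by omega
      rw [h1, ← List.getLast?_eq_getElem?, hlast]
      rfl
    have hg2 : PySem.List.pyGetD (M ++ [x]) (L.length : Int) 0 = x := by
      rw [PySem.List.pyGetD_of_nonneg _ _ (by omega), List.getD_eq_getElem?_getD]
      have h1 : ((L.length : Int)).toNat = M.length := by omega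
      rw [h1, List.getElem?_append_right le_rfl]
      simp
    have hset : fStepA (M ++ [x]) (L.length : Int) =
        M ++ [max (fThread d0 t + 1) x] := by
      simp only [fStepA, hg1, hg2]
      have h1 : ((L.length : Int)).toNat = M.length := by omega
      rw [h1, List.set_append_right _ _ le_rfl]
      simp
    rw [hset, List.getLast?_append_of_ne_nil M (by simp), fThread_append]
    rfl

theorem foldl_max_map_add_one (a : Int) (t : List Int) :
    (t.map (fun v => v + 1)).foldl max (a + 1) = t.foldl max a + 1 := by
  induction t generalizing a with
  | nil => rfl
  | cons b u ih =>
    simp only [List.map_cons, List.foldl_cons]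
    rw [show max (a + 1) (b + 1) = max a b + 1 by omega]
    exact ih (max a b)

-- B's maximum equals A's threaded greedy value
theorem fMax_eq_thread (d0 : Int) (rest : List Int) :
    PySem.List.max? ((PySem.List.enumerate (d0 :: rest)).map
        (fun q => q.2 + (((d0 :: rest).length : Int) - 1 - q.1))) (fun x => x) =
      some (fThread d0 rest) := by
  induction rest using List.reverseRecOn with
  | nil => simp [PySem.List.enumerate, PySem.List.max?, fThread]
  | append_singleton t x ih =>
    rw [show d0 :: (t ++ [x]) = (d0 :: t) ++ [x] from rfl]
    set L : List Int := d0 :: t with hL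
    have hmap : ((PySem.List.enumerate (L ++ [x])).map
          (fun q => q.2 + (((L ++ [x]).length : Int) - 1 - q.1))) =
        ((PySem.List.enumerate L).map
          (fun q => q.2 + ((L.length : Int) - 1 - q.1))).map (fun v => v + 1) ++ [x] := by
      rw [PySem.List.enumerate_append, List.map_append, List.map_map]
      congr 1
      · exact List.map_congr_left (fun q _ => by simp; push_cast; ring)
      · simp [PySem.List.enumerate]
    rw [hmap]
    rcases hme : (PySem.List.enumerate L).map (fun q => q.2 + ((L.length : Int) - 1 - q.1)) with _ | ⟨m0, mt⟩
    · exfalso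
      have hc := congrArg List.length hme
      simp [hL, PySem.List.length_enumerate] at hc
    · rw [hme] at ih
      rw [PySem.List.max?_id_cons] at ih
      have hv : mt.foldl max m0 = fThread d0 t := Option.some.inj ih
      rw [hme]
      simp only [List.map_cons, List.cons_append]
      rw [PySem.List.max?_id_cons, List.foldl_append, List.foldl_cons, List.foldl_nil,
          foldl_max_map_add_one, hv, fThread_append]

-- ===== VERDICT (by name: the statement is the Claim_ definition above) =====
theorem f_spec : Claim_equal_f := by
  intro r s p ll _ hpre
  unfold Spec_f f f_alt
  simp only [List.map_map]
  have habs : ((fun q : Int × Int => q.1 + (if q.2 > 0 then q.2 else -q.2)) ∘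
        (fun pp : Int × Int => (r - pp.1, if pp.2 ≤ s then s - (pp.2 - 1) else pp.2 - s))) =
      (fun q : Int × Int => r - q.1 + |if q.2 ≤ s then s - (q.2 - 1) else q.2 - s|) := by
    funext pp
    simp only [Function.comp]
    rcases abs_cases (if pp.2 ≤ s then s - (pp.2 - 1) else pp.2 - s) with ⟨he, _⟩ | ⟨he, _⟩ <;> omega
  rw [habs]
  have hne : PySem.List.sorted (ll.map (fun q : Int × Int => r - q.1 + |if q.2 ≤ s then s - (q.2 - 1) else q.2 - s|)) (fun x => x) false ≠ [] := by
    rw [Ne, PySem.List.sorted_eq_nil_iff, List.map_eq_nil_iff]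
    exact hpre
  obtain ⟨d0, rest, hcons⟩ := List.exists_cons_of_ne_nil hne
  rw [hcons, PySem.List.pyGet?_neg_one, fLoop_getLast d0 rest, fMax_eq_thread d0 rest]
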